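-- pv_equiv track=rewrite | github.com/kona419/CodingTest | study/plus/fruit_seller.py | solution
-- ===== SOURCE A (Python) =====
-- def solution(k, m, score):
--     answer = 0
--     box_cnt = 0
--     score.sort(reverse=True)
--     news=[score[i:i + m] for i in range(0, len(score), m)]
--
--     for new in news:
--         len_new = len(new)
--         if len_new == m:
--             box_cnt+=1
--
--     for new in news:
--         min_new = min(new)
--         len_new = len(new)
--         if len_new == m:
--             if min_new <= k:
--                 answer += (min_new*m)
--             else:
--                 answer += (k*m)
--     return answer
-- ===== SOURCE B (Python) =====
-- def solution(k, m, score):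
--     score.sort(reverse=True)
--     answer = 0
--     for i in range(m - 1, len(score), m):
--         answer += min(score[i], k) * m
--     return answer
-- ===== Notes on version B (the rewrite author's own statement) =====
-- stated objective: simpler
-- what changed: Instead of materialising the list of m-sized chunks and running two passes with min() over each chunk, B sorts descending and directly indexes each full group's minimum at positions m-1, 2m-1, ... in one loop, accumulating min(score[i], k) * m.
import Mathlib
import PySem

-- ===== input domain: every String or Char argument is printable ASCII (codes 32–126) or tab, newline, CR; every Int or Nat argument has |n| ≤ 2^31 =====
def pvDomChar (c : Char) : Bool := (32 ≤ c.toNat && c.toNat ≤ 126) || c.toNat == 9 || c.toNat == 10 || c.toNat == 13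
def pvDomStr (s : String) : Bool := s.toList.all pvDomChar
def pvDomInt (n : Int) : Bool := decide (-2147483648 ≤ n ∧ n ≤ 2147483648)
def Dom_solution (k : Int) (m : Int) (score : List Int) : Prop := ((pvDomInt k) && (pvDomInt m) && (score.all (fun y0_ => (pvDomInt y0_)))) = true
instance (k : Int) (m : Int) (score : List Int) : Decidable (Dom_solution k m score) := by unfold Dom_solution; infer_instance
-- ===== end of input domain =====

-- B replaces A's chunk-list construction and two passes (with min() per chunk) by one loop that
-- directly indexes each full group's minimum at positions m-1, 2m-1, … of the descending-sorted list.
-- Both A and B sort `score` in place; the equivalence proved here is about the RETURN value.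

-- ===== PORT A =====
def solution (k : Int) (m : Int) (score : List Int) : Int :=
  let answer : Int := 0
  let boxCnt : Int := 0
  let s := PySem.List.sorted score (fun x => x) true
  let news := (PySem.List.pyRange 0 (PySem.List.len s) m).map
      (fun i => PySem.List.slice s (some i) (some (i + m)))
  let _boxCnt := news.foldl (fun c new => if PySem.List.len new = m then c + 1 else c) boxCnt
  news.foldl (fun a new =>
    -- min(new): every chunk is nonempty (chunk starts are < len), so Python's min never raises here
    let minNew := (PySem.List.min? new (fun x => x)).getD 0
    if PySem.List.len new = m then
      (if minNew ≤ k then a + minNew * m else a + k * m)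
    else a) answer

-- ===== PORT B =====
def solution_alt (k : Int) (m : Int) (score : List Int) : Int :=
  let s := PySem.List.sorted score (fun x => x) true
  (PySem.List.pyRange (m - 1) (PySem.List.len s) m).foldl
    (fun answer i => answer + min (PySem.List.pyGetD s i 0) k * m) 0

-- ===== PRECONDITION & SPEC =====
-- Pre_ excludes exactly m = 0, where Python A raises ValueError (range() arg 3 must not be zero).
def Pre_solution (k : Int) (m : Int) (score : List Int) : Prop := m ≠ 0
instance (k : Int) (m : Int) (score : List Int) : Decidable (Pre_solution k m score) := by unfold Pre_solution; infer_instance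
def pvWitness_solution : Int × Int × List Int := (5, 3, [1, 2, 3, 4, 5, 6, 7])

def Spec_solution (k : Int) (m : Int) (score : List Int) (out : Int) : Prop := out = solution_alt k m score
instance (k : Int) (m : Int) (score : List Int) (out : Int) : Decidable (Spec_solution k m score out) := by unfold Spec_solution; infer_instance

-- ===== CLAIM (what is proved, stated in full; the proofs are below) =====
def Claim_equal_solution : Prop := ∀ (k : Int) (m : Int) (score : List Int), Dom_solution k m score → Pre_solution k m score → Spec_solution k m score (solution k m score)

-- ===== LEMMAS AND PROOFS =====

-- A's per-chunk contribution to `answer`.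
def chunkTerm (k m : Int) (c : List Int) : Int :=
  if PySem.List.len c = m then
    (if (PySem.List.min? c (fun x => x)).getD 0 ≤ k then (PySem.List.min? c (fun x => x)).getD 0 * m
     else k * m)
  else 0

lemma A_fold_eq (k m : Int) (l : List (List Int)) (a : Int) :
    l.foldl (fun a new =>
      if PySem.List.len new = m then
        (if (PySem.List.min? new (fun x => x)).getD 0 ≤ k then
          a + (PySem.List.min? new (fun x => x)).getD 0 * m
         else a + k * m)
      else a) a
    = a + (l.map (chunkTerm k m)).sum := by
  induction l generalizing a with
  | nil => simp
  | cons c t ih =>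
    simp only [List.foldl_cons, List.map_cons, List.sum_cons, ih, chunkTerm]
    split_ifs <;> ring

lemma pyRange_nil_of_neg (a b step : Int) (h : step < 0) (hab : a ≤ b) :
    PySem.List.pyRange a b step = [] := by
  simp [PySem.List.pyRange, show ¬step = 0 by omega, show ¬0 < step by omega,
    show ¬b < a by omega]

lemma foldl_min_desc (t : List Int) : ∀ (x : Int),
    (x :: t).Pairwise (fun a b => b ≤ a) →
    t.foldl min x = (x :: t).getLast (by simp) := by
  induction t with
  | nil => intro x _; simp
  | cons y t ih =>
    intro x hp
    have hyx : y ≤ x := (List.pairwise_cons.1 hp).1 y (by simp)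
    have hp' : (y :: t).Pairwise (fun a b => b ≤ a) := (List.pairwise_cons.1 hp).2
    simp only [List.foldl_cons, min_eq_right hyx]
    exact (ih y hp').trans (List.getLast_cons (by simp)).symm

lemma min?_desc (l : List Int) (h : l ≠ []) (hp : l.Pairwise (fun a b => b ≤ a)) :
    PySem.List.min? l (fun x => x) = some (l.getLast h) := by
  cases l with
  | nil => exact absurd rfl h
  | cons x t =>
    rw [PySem.List.min?_id_cons]
    exact congrArg some (foldl_min_desc t x hp)

-- key pointwise fact: for a full group starting at mm*j, A's chunk term equals B's indexed term
lemma point_eq (k : Int) (mm : Nat) (hmm : 0 < mm) (s : List Int)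
    (hs : s.Pairwise (fun a b => b ≤ a)) (j : Nat) (hj : mm * j + mm ≤ s.length) :
    chunkTerm k (mm : Int) (PySem.List.slice s (some (0 + (mm : Int) * (j : Int)))
      (some (0 + (mm : Int) * (j : Int) + (mm : Int))))
    = min (PySem.List.pyGetD s ((mm : Int) - 1 + (mm : Int) * (j : Int)) 0) k * (mm : Int) := by
  have e1 : (0 + (mm : Int) * (j : Int)) = ((mm * j : Nat) : Int) := by push_cast; ring
  rw [e1, PySem.List.slice_natCast_add]
  have hlen : ((s.drop (mm * j)).take mm).length = mm := by
    simp only [List.length_take, List.length_drop]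
    omega
  have hc_ne : (s.drop (mm * j)).take mm ≠ [] :=
    List.ne_nil_of_length_pos (by omega)
  have hcp : ((s.drop (mm * j)).take mm).Pairwise (fun a b => b ≤ a) :=
    List.Pairwise.take (List.Pairwise.drop hs)
  have hval : ((s.drop (mm * j)).take mm).getLast hc_ne = s[mm * j + mm - 1]'(by omega) := by
    rw [List.getLast_eq_getElem]
    simp only [List.getElem_take, List.getElem_drop, hlen]
    congr 1
    omega
  have e2 : ((mm : Int) - 1 + (mm : Int) * (j : Int)) = ((mm * j + mm - 1 : Nat) : Int) := by
    omega
  rw [e2, PySem.List.pyGetD_natCast, List.getD_eq_getElem _ _ (by omega)]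
  unfold chunkTerm
  rw [min?_desc _ hc_ne hcp, hval]
  simp only [PySem.List.len_eq, hlen, Option.getD_some, if_true]
  split_ifs with hik
  · rw [min_eq_left hik]
  · rw [min_eq_right (not_le.mp hik).le]

-- ===== VERDICT (by name: the statement is the Claim_ definition above) =====
theorem solution_spec : Claim_equal_solution := by
  intro k m score _ hpre
  unfold Pre_solution at hpre
  unfold Spec_solution
  simp only [solution, solution_alt]
  have hs : (PySem.List.sorted score (fun x => x) true).Pairwise (fun a b => b ≤ a) :=
    PySem.List.sorted_pairwise_rev score _
  set s := PySem.List.sorted score (fun x => x) true with hsdef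
  rw [A_fold_eq]
  simp only [PySem.List.len_eq, zero_add]
  rcases lt_trichotomy m 0 with hm | hm | hm
  · rw [pyRange_nil_of_neg 0 _ m hm (by positivity),
        pyRange_nil_of_neg (m - 1) _ m hm (by omega)]
    simp
  · exact absurd hm hpre
  · obtain ⟨mm, rfl⟩ : ∃ mm : Nat, m = (mm : Int) := ⟨m.toNat, (Int.toNat_of_nonneg hm.le).symm⟩
    have hmm : 0 < mm := by exact_mod_cast hm
    set n := s.length with hn
    rw [PySem.List.pyRange_of_pos _ _ hm, PySem.List.pyRange_of_pos _ _ hm]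
    have hdm := Nat.div_add_mod n mm
    have hcA : (if (0 : Int) < (n : Int) then (((n : Int) - 0 + (mm : Int) - 1) / (mm : Int)).toNat else 0)
        = (n + mm - 1) / mm := by
      split_ifs with h
      · have e : ((n : Int) - 0 + (mm : Int) - 1) = ((n + mm - 1 : Nat) : Int) := by omega
        rw [e, ← Int.natCast_div, Int.toNat_natCast]
      · have hn0 : n = 0 := by omega
        rw [hn0]
        simp [Nat.div_eq_of_lt (by omega : mm - 1 < mm)]
    have hcB : (if (mm : Int) - 1 < (n : Int) then (((n : Int) - ((mm : Int) - 1) + (mm : Int) - 1) / (mm : Int)).toNat else 0)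
        = n / mm := by
      split_ifs with h
      · have e : ((n : Int) - ((mm : Int) - 1) + (mm : Int) - 1) = ((n : Nat) : Int) := by omega
        rw [e, ← Int.natCast_div, Int.toNat_natCast]
      · have : n < mm := by omega
        rw [Nat.div_eq_of_lt this]
    rw [hcA, hcB]
    simp only [List.foldl_map, List.map_map]
    rw [PySem.List.foldl_add]
    simp only [zero_add]
    have hpt : ∀ j ∈ List.range (n / mm),
        (chunkTerm k (mm : Int) ∘ (fun i => PySem.List.slice s (some i) (some (i + (mm : Int)))) ∘
          fun kk : Nat => (mm : Int) * (kk : Int)) j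
        = min (PySem.List.pyGetD s ((mm : Int) - 1 + (mm : Int) * (j : Int)) 0) k * (mm : Int) := by
      intro j hjmem
      have hjq : j < n / mm := List.mem_range.mp hjmem
      have h1 : (j + 1) * mm ≤ (n / mm) * mm := Nat.mul_le_mul_right _ (by omega)
      have h2 : (n / mm) * mm ≤ n := Nat.div_mul_le_self n mm
      have hj : mm * j + mm ≤ n := by
        have e : (j + 1) * mm = j * mm + mm := by ring
        have e2 : j * mm = mm * j := by ring
        omega
      simpa using point_eq k mm hmm s hs j hj
    rcases Nat.eq_zero_or_pos (n % mm) with hr | hr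
    · have hceil : (n + mm - 1) / mm = n / mm := by
        have e : n + mm - 1 = mm * (n / mm) + (mm - 1) := by omega
        rw [e, Nat.mul_add_div hmm, Nat.div_eq_of_lt (show mm - 1 < mm by omega), Nat.add_zero]
      rw [hceil]
      exact congrArg List.sum (List.map_congr_left hpt)
    · have hr2 : n % mm < mm := Nat.mod_lt _ hmm
      have hceil : (n + mm - 1) / mm = n / mm + 1 := by
        have hmul : mm * (n / mm + 1) = mm * (n / mm) + mm := by ring
        have e : n + mm - 1 = mm * (n / mm + 1) + (n % mm - 1) := by omega
        rw [e, Nat.mul_add_div hmm, Nat.div_eq_of_lt (show n % mm - 1 < mm by omega)]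
      rw [hceil, List.range_succ, List.map_append, List.sum_append]
      simp only [List.map_cons, List.map_nil, List.sum_cons, List.sum_nil, add_zero,
        Function.comp_apply]
      have hzero : chunkTerm k (mm : Int) (PySem.List.slice s (some ((mm : Int) * ((n / mm : Nat) : Int)))
          (some ((mm : Int) * ((n / mm : Nat) : Int) + (mm : Int)))) = 0 := by
        have e1 : ((mm : Int) * ((n / mm : Nat) : Int)) = ((mm * (n / mm) : Nat) : Int) := by
          push_cast; ring
        rw [e1, PySem.List.slice_natCast_add]
        have hlen : ((s.drop (mm * (n / mm))).take mm).length = n % mm := by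
          simp only [List.length_take, List.length_drop]
          omega
        unfold chunkTerm
        rw [if_neg]
        simp only [PySem.List.len_eq, hlen]
        intro hcon
        have : n % mm = mm := by exact_mod_cast hcon
        omega
      rw [hzero, add_zero]
      exact congrArg List.sum (List.map_congr_left hpt)
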